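-- pv_equiv track=rewrite | github.com/Rafael-Sapienza/computacao | programas/1Semestre/projetoAPC/projeto_v1.py | erroDoEspacoEmBranco
-- ===== SOURCE A (Python) =====
-- def erroDoEspacoEmBranco(s):
--     espacosEmBrancoConsecutivos = []
--     flag = False
--     for i in range(len(s)-1):
--         primeiro = s[i]
--         segundo = s[i+1]
--         if primeiro == ' ' and segundo == ' ':
--             flag = True
--         if primeiro != ' ':
--             flag = False
--         if flag:
--             espacosEmBrancoConsecutivos.append(i)
--     if s[-2] == ' ' and s[-1] == ' ':
--         espacosEmBrancoConsecutivos.append(len(s)-1)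
--     return espacosEmBrancoConsecutivos
-- ===== SOURCE B (Python) =====
-- def erroDoEspacoEmBranco(s):
--     # Scan maximal runs of equal characters; emit every index of each
--     # space-run of length >= 2.  (A instead walks index pairs with a
--     # boolean-flag state machine plus a special trailing s[-2]/s[-1] check.)
--     res = []
--     n = len(s)
--     i = 0
--     while i < n:
--         j = i + 1
--         while j < n and s[j] == s[i]:
--             j += 1
--         if s[i] == ' ' and j - i >= 2:
--             res.extend(range(i, j))
--         i = j
--     return res
-- ===== Notes on version B (the rewrite author's own statement) =====
-- stated objective: alternative
-- what changed: B scans maximal runs of equal characters and emits all indices of space-runs of length >= 2 in one run-based pass, replacing A's pairwise index scan with a boolean-flag state machine and its special trailing s[-2]/s[-1] check.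
-- crash fix: On strings of length 0 or 1 A raises IndexError (the s[-2] access); B returns []. — e.g. on erroDoEspacoEmBranco(" "): A raises IndexError, B returns []
import Mathlib
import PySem

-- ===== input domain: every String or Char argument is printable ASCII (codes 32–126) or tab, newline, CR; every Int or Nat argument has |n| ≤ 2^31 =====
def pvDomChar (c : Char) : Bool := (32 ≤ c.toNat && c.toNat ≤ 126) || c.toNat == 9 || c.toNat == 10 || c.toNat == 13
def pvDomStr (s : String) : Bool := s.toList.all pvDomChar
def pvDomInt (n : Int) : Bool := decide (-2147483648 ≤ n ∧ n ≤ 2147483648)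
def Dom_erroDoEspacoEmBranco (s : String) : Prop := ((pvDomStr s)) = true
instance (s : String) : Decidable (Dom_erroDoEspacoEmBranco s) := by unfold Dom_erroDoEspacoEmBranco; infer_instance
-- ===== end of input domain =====

-- B replaces A's pairwise boolean-flag state-machine scan (plus trailing s[-2]/s[-1] patch)
-- by a single pass over maximal runs of equal characters; same O(n) cost, plainer structure.


-- ===== PORT A =====
-- loop body of A; indices are always in range inside the loop, so pyGetD is exact there
def pvStepA (cs : List Char) (st : List Int × Bool) (i : Int) : List Int × Bool :=
  let primeiro := PySem.List.pyGetD cs i 'x'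
  let segundo := PySem.List.pyGetD cs (i + 1) 'x'
  let flag1 := if primeiro == ' ' && segundo == ' ' then true else st.2
  let flag2 := if primeiro != ' ' then false else flag1
  (if flag2 then st.1 ++ [i] else st.1, flag2)

def erroDoEspacoEmBranco (s : String) : List Int :=
  let cs := s.toList
  let r := (PySem.List.pyRange 0 ((cs.length : Int) - 1) 1).foldl (pvStepA cs) ([], false)
  match PySem.List.pyGet? cs (-2), PySem.List.pyGet? cs (-1) with
  | some a, some b => if a == ' ' && b == ' ' then r.1 ++ [(cs.length : Int) - 1] else r.1
  | _, _ => r.1   -- Python raises IndexError here (len < 2); excluded by Pre_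

-- ===== PORT B =====
-- inner while: advance j while s[j] equals the run character c
def pvRunEnd (cs : List Char) (c : Char) (j : Nat) : Nat :=
  if h : j < cs.length ∧ cs.getD j 'x' == c then pvRunEnd cs c (j + 1) else j
termination_by cs.length - j
decreasing_by omega

-- outer while over run starts
def pvBGo (cs : List Char) (i : Nat) : List Int :=
  if h : i < cs.length then
    (if cs.getD i 'x' == ' ' && 2 ≤ pvRunEnd cs (cs.getD i 'x') (i + 1) - i
      then PySem.List.pyRange i (pvRunEnd cs (cs.getD i 'x') (i + 1)) 1 else [])
    ++ pvBGo cs (pvRunEnd cs (cs.getD i 'x') (i + 1))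
  else []
termination_by cs.length - i
decreasing_by
  · have : i + 1 ≤ pvRunEnd cs (cs.getD i 'x') (i + 1) := by
      generalize i + 1 = j0
      induction j0 using pvRunEnd.induct (cs := cs) (c := cs.getD i 'x') with
      | case1 j hj ih => rw [pvRunEnd, dif_pos hj]; omega
      | case2 j hj => rw [pvRunEnd, dif_neg hj]
    omega

def erroDoEspacoEmBranco_alt (s : String) : List Int := pvBGo s.toList 0

-- ===== PRECONDITION & SPEC =====
-- A evaluates s[-2]; it raises IndexError iff len(s) < 2.
def Pre_erroDoEspacoEmBranco (s : String) : Prop := 2 ≤ s.toList.length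
instance (s : String) : Decidable (Pre_erroDoEspacoEmBranco s) := by unfold Pre_erroDoEspacoEmBranco; infer_instance
def pvWitness_erroDoEspacoEmBranco : String := "ab  c"

-- On strings of length 0 or 1 A raises IndexError (the s[-2] access); B returns [].
def Raises_erroDoEspacoEmBranco (s : String) : Prop := s.toList.length < 2
instance (s : String) : Decidable (Raises_erroDoEspacoEmBranco s) := by unfold Raises_erroDoEspacoEmBranco; infer_instance
def pvRaiseWitness_erroDoEspacoEmBranco : String := " "
def pvRaiseWitnessOut_erroDoEspacoEmBranco : List Int := []

def Spec_erroDoEspacoEmBranco (s : String) (out : List Int) : Prop := out = erroDoEspacoEmBranco_alt s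
instance (s : String) (out : List Int) : Decidable (Spec_erroDoEspacoEmBranco s out) := by unfold Spec_erroDoEspacoEmBranco; infer_instance

-- ===== CLAIM (what is proved, stated in full; the proofs are below) =====
def Claim_equal_erroDoEspacoEmBranco : Prop := ∀ (s : String), Dom_erroDoEspacoEmBranco s → Pre_erroDoEspacoEmBranco s → Spec_erroDoEspacoEmBranco s (erroDoEspacoEmBranco s)
def Claim_raises_erroDoEspacoEmBranco : Prop := (∀ (s : String), Dom_erroDoEspacoEmBranco s → Raises_erroDoEspacoEmBranco s → ¬ Pre_erroDoEspacoEmBranco s) ∧ (Dom_erroDoEspacoEmBranco (pvRaiseWitness_erroDoEspacoEmBranco) ∧ Raises_erroDoEspacoEmBranco (pvRaiseWitness_erroDoEspacoEmBranco) ∧ erroDoEspacoEmBranco_alt (pvRaiseWitness_erroDoEspacoEmBranco) = pvRaiseWitnessOut_erroDoEspacoEmBranco)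

-- ===== LEMMAS AND PROOFS =====

-- the common characterisation: index i is a space with a space neighbour
def pvP (cs : List Char) (i : Nat) : Bool :=
  (cs.getD i 'x' == ' ') && ((cs.getD (i + 1) 'x' == ' ') || (decide (0 < i) && (cs.getD (i - 1) 'x' == ' ')))

theorem pvRunEnd_spec (cs : List Char) (c : Char) (j0 : Nat) (h0 : j0 ≤ cs.length) :
    j0 ≤ pvRunEnd cs c j0 ∧ pvRunEnd cs c j0 ≤ cs.length ∧
    (∀ k, j0 ≤ k → k < pvRunEnd cs c j0 → cs.getD k 'x' = c) ∧
    (pvRunEnd cs c j0 < cs.length → cs.getD (pvRunEnd cs c j0) 'x' ≠ c) := by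
  induction j0 using pvRunEnd.induct (cs := cs) (c := c) with
  | case1 j hj ih =>
    rw [pvRunEnd, dif_pos hj]
    obtain ⟨h1, h2, h3, h4⟩ := ih (by omega)
    refine ⟨by omega, h2, ?_, h4⟩
    intro k hk1 hk2
    rcases Nat.eq_or_lt_of_le hk1 with h | h
    · subst h; exact (beq_iff_eq.mp hj.2)
    · exact h3 k (by omega) hk2
  | case2 j hj =>
    rw [pvRunEnd, dif_neg hj]
    refine ⟨le_refl _, h0, by omega, ?_⟩
    intro hl heq
    exact hj ⟨hl, beq_iff_eq.mpr heq⟩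

-- B computes the pvP-filter from any run boundary
theorem pvBGo_eq_filter (cs : List Char) (i : Nat)
    (hb : i = 0 ∨ cs.length ≤ i ∨ cs.getD (i - 1) 'x' ≠ cs.getD i 'x') :
    pvBGo cs i = ((List.range' i (cs.length - i)).filter (pvP cs)).map Int.ofNat := by
  by_cases h : i < cs.length
  · rw [pvBGo, dif_pos h]
    obtain ⟨h1, h2, h3, h4⟩ := pvRunEnd_spec cs (cs.getD i 'x') (i + 1) (by omega)
    set c := cs.getD i 'x' with hc
    set j := pvRunEnd cs c (i + 1) with hjdef
    have hrec : pvBGo cs j = ((List.range' j (cs.length - j)).filter (pvP cs)).map Int.ofNat := by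
      apply pvBGo_eq_filter
      by_cases hjl : j < cs.length
      · right; right
        have hprev : cs.getD (j - 1) 'x' = c := by
          rcases Nat.eq_or_lt_of_le h1 with he | hlt
          · have : j - 1 = i := by omega
            rw [this]
          · exact h3 (j - 1) (by omega) (by omega)
        rw [hprev]; exact fun hcontra => (h4 hjl) hcontra.symm
      · right; left; omega
    have hsplit : List.range' i (cs.length - i) = List.range' i (j - i) ++ List.range' j (cs.length - j) := by
      rw [show cs.length - i = (j - i) + (cs.length - j) from by omega, ← List.range'_append]
      have : i + 1 * (j - i) = j := by omega
      rw [this]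
    rw [hsplit, List.filter_append, List.map_append, hrec]
    congr 1
    have hrun : ∀ k, i ≤ k → k < j → cs.getD k 'x' = c := by
      intro k hk1 hk2
      rcases Nat.eq_or_lt_of_le hk1 with he | hlt
      · rw [← he]
      · exact h3 k (by omega) hk2
    by_cases hcase : c = ' ' ∧ 2 ≤ j - i
    · -- a space run of length ≥ 2: every index in [i, j) passes the filter
      have hfilt : (List.range' i (j - i)).filter (pvP cs) = List.range' i (j - i) := by
        apply List.filter_eq_self.mpr
        intro k hk
        have hk' := List.mem_range'_1.mp hk
        have hks : cs.getD k 'x' = ' ' := by rw [hrun k hk'.1 (by omega), hcase.1]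
        unfold pvP
        simp only [hks, beq_self_eq_true, Bool.true_and]
        by_cases hk1 : k + 1 < j
        · have hnx : cs.getD (k + 1) 'x' = ' ' := by rw [hrun (k + 1) (by omega) hk1, hcase.1]
          rw [List.getD_eq_getElem?_getD] at hnx
          simp [hnx]
        · have hki : i < k := by omega
          have hk0 : 0 < k := by omega
          have hpv : cs.getD (k - 1) 'x' = ' ' := by rw [hrun (k - 1) (by omega) (by omega), hcase.1]
          rw [List.getD_eq_getElem?_getD] at hpv
          simp [hpv, hk0]
      rw [if_pos (by simp [hcase.1, hcase.2]), hfilt]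
      rw [PySem.List.pyRange_one, List.range'_eq_map_range]
      rw [show ((j : Int) - (i : Int)).toNat = j - i from by omega, List.map_map]
      apply List.map_congr_left
      intro k _
      simp only [Function.comp_apply, Int.ofNat_eq_natCast]
      push_cast
      ring
    · -- not a space run of length ≥ 2: no index in [i, j) passes
      have hfilt : (List.range' i (j - i)).filter (pvP cs) = [] := by
        apply List.filter_eq_nil_iff.mpr
        intro k hk
        have hk' := List.mem_range'_1.mp hk
        have hkc : cs.getD k 'x' = c := hrun k hk'.1 (by omega)
        unfold pvP
        by_cases hsp : c = ' '
        · -- the run has length exactly 1: k = i, both neighbours differ from ' '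
          have hj1 : j = i + 1 := by
            have hno : ¬ 2 ≤ j - i := fun hge => hcase ⟨hsp, hge⟩
            omega
          have hki : k = i := by omega
          subst hki
          have hnext : cs.getD (k + 1) 'x' ≠ ' ' := by
            by_cases hl : k + 1 < cs.length
            · have h4' := h4 (by omega : j < cs.length)
              rw [hj1] at h4'
              intro hcontra; exact h4' (by rw [hcontra, hsp])
            · rw [List.getD_eq_default _ _ (by omega)]; decide
          have hprev : 0 < k → cs.getD (k - 1) 'x' ≠ ' ' := by
            intro hk0
            rcases hb with hb | hb | hb
            · omega
            · omega
            · rw [hsp] at hb; exact hb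
          rw [List.getD_eq_getElem?_getD] at hkc hnext
          simp only [List.getD_eq_getElem?_getD] at hprev
          simp [hkc, hsp, hnext]
          exact hprev
        · rw [List.getD_eq_getElem?_getD] at hkc
          simp [hkc, hsp]
      have hcnd : ¬ (c == ' ' && decide (2 ≤ j - i)) = true := by
        simp only [Bool.and_eq_true, beq_iff_eq, decide_eq_true_eq, not_and]
        intro hceq hge
        exact hcase ⟨hceq, hge⟩
      rw [hfilt, if_neg hcnd]
      simp
  · rw [pvBGo, dif_neg h]
    rw [show cs.length - i = 0 from by omega]
    simp
termination_by cs.length - i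
decreasing_by
  have : i + 1 ≤ pvRunEnd cs (cs.getD i 'x') (i + 1) := (pvRunEnd_spec cs _ (i + 1) (by omega)).1
  omega

-- A's flag after processing loop index m equals pvP at the previous index
def pvFlag (cs : List Char) (m : Nat) : Bool := if m = 0 then false else pvP cs (m - 1)

theorem pvStepA_char (cs : List Char) (st : List Int × Bool) (m : Nat) (h1 : m + 1 < cs.length) :
    pvStepA cs st (m : Int) =
      (if (cs.getD m 'x' == ' ') && ((cs.getD (m + 1) 'x' == ' ') || st.2) then st.1 ++ [(m : Int)] else st.1,
       (cs.getD m 'x' == ' ') && ((cs.getD (m + 1) 'x' == ' ') || st.2)) := by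
  unfold pvStepA
  have e1 : PySem.List.pyGetD cs (m : Int) 'x' = cs.getD m 'x' := PySem.List.pyGetD_natCast cs m 'x'
  have e2 : PySem.List.pyGetD cs ((m : Int) + 1) 'x' = cs.getD (m + 1) 'x' := by
    rw [show ((m : Int) + 1) = ((m + 1 : Nat) : Int) from by push_cast; ring]
    exact PySem.List.pyGetD_natCast cs (m + 1) 'x'
  rw [e1, e2]
  simp only [List.getD_eq_getElem?_getD]
  by_cases hm : cs[m]?.getD 'x' = ' ' <;> by_cases hn : cs[m + 1]?.getD 'x' = ' ' <;>
    cases hst : st.2 <;> simp [hm, hn, hst]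

theorem pvFoldA (cs : List Char) (m : Nat) (hm : m + 1 ≤ cs.length) :
    ((List.range m).map Int.ofNat).foldl (pvStepA cs) ([], false) =
      (((List.range m).filter (pvP cs)).map Int.ofNat, pvFlag cs m) := by
  induction m with
  | zero => simp [pvFlag]
  | succ m ih =>
    rw [List.range_succ, List.map_append, List.foldl_append, ih (by omega)]
    simp only [List.map_cons, List.map_nil, List.foldl_cons, List.foldl_nil, Int.ofNat_eq_natCast]
    rw [pvStepA_char cs _ m (by omega)]
    have hflag : ((cs.getD m 'x' == ' ') && ((cs.getD (m + 1) 'x' == ' ') || pvFlag cs m)) = pvP cs m := by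
      unfold pvFlag pvP
      by_cases hm0 : m = 0
      · subst hm0; simp
      · have hpos : 0 < m := by omega
        rw [if_neg hm0, show m - 1 + 1 = m from by omega]
        simp only [List.getD_eq_getElem?_getD]
        cases hm' : (cs[m]?.getD 'x' == ' ') <;>
          cases hn' : (cs[m + 1]?.getD 'x' == ' ') <;>
            cases hp' : (cs[m - 1]?.getD 'x' == ' ') <;>
              simp [hm', hn', hp', hpos]
    have hpf : pvFlag cs (m + 1) = pvP cs m := by simp [pvFlag]
    rw [hflag, hpf, List.filter_append, List.map_append]
    by_cases hP : pvP cs m = true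
    · simp [hP]
    · simp [hP]

theorem pvA_eq_filter (cs : List Char) (h2 : 2 ≤ cs.length) :
    ((PySem.List.pyRange 0 ((cs.length : Int) - 1) 1).foldl (pvStepA cs) ([], false)).1 ++
      (if cs.getD (cs.length - 2) 'x' == ' ' && (cs.getD (cs.length - 1) 'x' == ' ') then [((cs.length : Int) - 1)] else []) =
    ((List.range cs.length).filter (pvP cs)).map Int.ofNat := by
  have hr : PySem.List.pyRange 0 ((cs.length : Int) - 1) 1 = (List.range (cs.length - 1)).map Int.ofNat := by
    rw [PySem.List.pyRange_one]
    rw [show (((cs.length : Int) - 1) - 0).toNat = cs.length - 1 from by omega]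
    apply List.map_congr_left
    intro k _
    simp
  rw [hr, pvFoldA cs (cs.length - 1) (by omega)]
  have hlast : (cs.getD (cs.length - 2) 'x' == ' ' && (cs.getD (cs.length - 1) 'x' == ' ')) = pvP cs (cs.length - 1) := by
    unfold pvP
    have hn : cs.getD (cs.length - 1 + 1) 'x' = 'x' := List.getD_eq_default _ _ (by omega)
    rw [hn, show cs.length - 1 - 1 = cs.length - 2 from by omega,
        show decide (0 < cs.length - 1) = true from by simp; omega]
    simp [Bool.and_comm]
  rw [hlast]
  conv_rhs => rw [show cs.length = (cs.length - 1) + 1 from by omega, List.range_succ]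
  rw [List.filter_append, List.map_append]
  congr 1
  simp only [List.filter_cons, List.filter_nil]
  by_cases hP : pvP cs (cs.length - 1) = true
  · simp only [hP, if_true, List.map_cons, List.map_nil]
    congr 2
    simp only [Int.ofNat_eq_natCast]
    push_cast
    omega
  · simp [hP]

-- ===== VERDICT (by name: the statement is the Claim_ definition above) =====
theorem erroDoEspacoEmBranco_spec : Claim_equal_erroDoEspacoEmBranco := by
  intro s _ hpre
  unfold Spec_erroDoEspacoEmBranco
  have h2 : 2 ≤ s.toList.length := hpre
  have ha : PySem.List.pyGet? s.toList (-2) = some (s.toList.getD (s.toList.length - 2) 'x') := by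
    rw [PySem.List.pyGet?_neg_ofNat s.toList 2 (by omega) (by omega)]
    rw [List.getElem?_eq_getElem (by omega), List.getD_eq_getElem s.toList 'x' (by omega)]
  have hb : PySem.List.pyGet? s.toList (-1) = some (s.toList.getD (s.toList.length - 1) 'x') := by
    rw [PySem.List.pyGet?_neg_ofNat s.toList 1 (by omega) (by omega)]
    rw [List.getElem?_eq_getElem (by omega), List.getD_eq_getElem s.toList 'x' (by omega)]
  have hB := pvBGo_eq_filter s.toList 0 (Or.inl rfl)
  have hA := pvA_eq_filter s.toList h2
  simp only [erroDoEspacoEmBranco, erroDoEspacoEmBranco_alt, ha, hb]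
  rw [hB, Nat.sub_zero, ← List.range_eq_range', ← hA]
  by_cases hcnd : (s.toList.getD (s.toList.length - 2) 'x' == ' ' && (s.toList.getD (s.toList.length - 1) 'x' == ' ')) = true
  · rw [if_pos hcnd, if_pos hcnd]
  · rw [if_neg hcnd, if_neg hcnd, List.append_nil]

theorem erroDoEspacoEmBranco_raises : Claim_raises_erroDoEspacoEmBranco := by
  unfold Claim_raises_erroDoEspacoEmBranco
  constructor
  · intro s _ hr hp
    unfold Raises_erroDoEspacoEmBranco at hr
    unfold Pre_erroDoEspacoEmBranco at hp
    omega
  · refine ⟨by decide, by decide, ?_⟩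
    unfold erroDoEspacoEmBranco_alt pvRaiseWitness_erroDoEspacoEmBranco pvRaiseWitnessOut_erroDoEspacoEmBranco
    rw [show (" ".toList) = [' '] from rfl]
    rw [pvBGo, dif_pos (by norm_num)]
    rw [show pvRunEnd [' '] (List.getD [' '] 0 'x') (0 + 1) = 1 from by
      rw [pvRunEnd, dif_neg (by norm_num)]]
    rw [if_neg (by decide)]
    rw [pvBGo, dif_neg (by norm_num)]
    rfl

-- self-check: the crash-fix witness value is exactly what the raises claim pins down
theorem pvRaiseWitness_ok :
    erroDoEspacoEmBranco_alt pvRaiseWitness_erroDoEspacoEmBranco = pvRaiseWitnessOut_erroDoEspacoEmBranco :=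
  erroDoEspacoEmBranco_raises.2.2.2
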